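-- pv_equiv track=rewrite | github.com/m0nstereXe/CG | main.py | find_interior_path
-- ===== SOURCE A (Python) =====
-- from collections import deque
--
-- def normalize_edge(u: int, v: int) -> tuple[int, int]:
--     return (u, v) if u < v else (v, u)
--
-- def find_interior_path(
--     adjacency: dict[int, set[int]],
--     start: int,
--     goal: int,
--     hull_edges: set[tuple[int, int]],
-- ) -> list[int] | None:
--     queue: deque[int] = deque([start])
--     parents: dict[int, int | None] = {start: None}
--     while queue:
--         node = queue.popleft()
--         if node == goal:
--             break
--         for neighbor in adjacency.get(node, ()):
--             edge = normalize_edge(node, neighbor)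
--             if (
--                 edge in hull_edges
--                 and node not in (start, goal)
--                 and neighbor not in (start, goal)
--             ):
--                 continue
--             if neighbor in parents:
--                 continue
--             parents[neighbor] = node
--             queue.append(neighbor)
--     else:
--         return None
--
--     path: list[int] = []
--     cur: int | None = goal
--     while cur is not None:
--         path.append(cur)
--         cur = parents[cur]
--     path.reverse()
--     if not path or path[0] != start or path[-1] != goal:
--         return None
--     return path
-- ===== SOURCE B (Python) =====
-- from collections import deque
--
--
-- def normalize_edge(u: int, v: int) -> tuple[int, int]:
--     return (u, v) if u < v else (v, u)
--
--
-- def find_interior_path(adjacency, start, goal, hull_edges):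
--     # Single-pass BFS over whole paths: no parent table, no reconstruction phase.
--     queue = deque([[start]])
--     visited = {start}
--     while queue:
--         path = queue.popleft()
--         node = path[-1]
--         if node == goal:
--             return path
--         for neighbor in adjacency.get(node, ()):
--             edge = normalize_edge(node, neighbor)
--             if (
--                 edge in hull_edges
--                 and node not in (start, goal)
--                 and neighbor not in (start, goal)
--             ):
--                 continue
--             if neighbor in visited:
--                 continue
--             visited.add(neighbor)
--             queue.append(path + [neighbor])
--     return None
-- ===== Notes on version B (the rewrite author's own statement) =====
-- stated objective: simpler
-- what changed: B replaces A's two-phase scheme (parents table built by BFS, then a backtracking reconstruction pass plus sanity checks) with a single-pass BFS over a queue of complete paths and a visited set, returning the popped path directly at the goal.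
import Mathlib
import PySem

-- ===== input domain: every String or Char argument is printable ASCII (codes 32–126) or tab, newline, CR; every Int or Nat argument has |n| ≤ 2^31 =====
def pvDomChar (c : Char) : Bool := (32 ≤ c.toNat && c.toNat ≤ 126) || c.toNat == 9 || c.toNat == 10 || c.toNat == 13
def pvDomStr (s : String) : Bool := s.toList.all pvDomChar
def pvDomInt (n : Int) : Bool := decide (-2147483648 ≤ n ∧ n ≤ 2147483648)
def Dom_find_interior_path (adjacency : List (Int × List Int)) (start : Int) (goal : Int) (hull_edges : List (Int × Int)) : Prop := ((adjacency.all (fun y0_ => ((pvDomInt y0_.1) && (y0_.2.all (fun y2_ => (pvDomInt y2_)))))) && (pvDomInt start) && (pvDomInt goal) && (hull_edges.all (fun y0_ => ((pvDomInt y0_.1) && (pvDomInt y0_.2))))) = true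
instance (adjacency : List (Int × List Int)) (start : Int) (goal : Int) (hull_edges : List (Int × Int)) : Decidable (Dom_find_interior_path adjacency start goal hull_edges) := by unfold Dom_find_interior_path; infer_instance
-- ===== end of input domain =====

-- ===== PORT A =====
-- B replaces A's parents-table BFS + backtracking reconstruction with a single-pass
-- BFS over a queue of complete paths; the return values are proved equal.

def normalize_edge (u : Int) (v : Int) : Int × Int :=
  if u < v then (u, v) else (v, u)

-- inner 'for neighbor in adjacency.get(node, ())' body of A
def fipScanA (start goal : Int) (hull_edges : List (Int × Int)) (node : Int)
    (st : List Int × PySem.Dict Int (Option Int)) (neighbor : Int) :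
    List Int × PySem.Dict Int (Option Int) :=
  if normalize_edge node neighbor ∈ hull_edges ∧ ¬(node = start ∨ node = goal) ∧
      ¬(neighbor = start ∨ neighbor = goal) then
    st
  else if st.2.contains neighbor then
    st
  else
    (st.1 ++ [neighbor], st.2.insert neighbor (some node))

-- A's 'while queue:' loop; the fuel bounds the number of pops (each pop consumes one
-- enqueue, and enqueues are bounded by 1 + total adjacency size, < fuel);
-- 'none' on the empty queue is the while-else 'return None'
def fipLoopA (adjacency : List (Int × List Int)) (start goal : Int)
    (hull_edges : List (Int × Int)) :
    Nat → List Int → PySem.Dict Int (Option Int) → Option (PySem.Dict Int (Option Int))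
  | 0, _, _ => none
  | _ + 1, [], _ => none
  | fuel + 1, node :: rest, parents =>
    if node = goal then some parents
    else
      let st := ((List.lookup node adjacency).getD []).foldl
        (fipScanA start goal hull_edges node) (rest, parents)
      fipLoopA adjacency start goal hull_edges fuel st.1 st.2

-- A's reconstruction loop 'while cur is not None'; a missing key (Python KeyError,
-- unreachable from the loop's states) stops the walk
def fipBack (parents : PySem.Dict Int (Option Int)) :
    Nat → Option Int → List Int → List Int
  | _, none, acc => acc
  | 0, some _, acc => acc
  | fuel + 1, some c, acc =>
    fipBack parents fuel ((parents.get? c).getD none) (acc ++ [c])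

-- A's code after the loop: reconstruct, reverse, sanity-check
def fipFinish (start goal : Int) (parents : PySem.Dict Int (Option Int)) : Option (List Int) :=
  let path := (fipBack parents (parents.size + 1) (some goal) []).reverse
  if path = [] ∨ path.head? ≠ some start ∨ path.getLast? ≠ some goal then none
  else some path

def find_interior_path (adjacency : List (Int × List Int)) (start : Int) (goal : Int) (hull_edges : List (Int × Int)) : Option (List Int) :=
  let fuel := adjacency.foldl (fun a p => a + p.2.length) 0 + 1
  match fipLoopA adjacency start goal hull_edges fuel [start]
      (PySem.Dict.empty.insert start none) with
  | none => none
  | some parents => fipFinish start goal parents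

-- ===== PORT B =====
-- inner loop body of B: enqueue the extended path, mark the neighbor visited
def fipScanB (start goal : Int) (hull_edges : List (Int × Int)) (node : Int) (path : List Int)
    (st : List (List Int) × PySem.Set Int) (neighbor : Int) :
    List (List Int) × PySem.Set Int :=
  if normalize_edge node neighbor ∈ hull_edges ∧ ¬(node = start ∨ node = goal) ∧
      ¬(neighbor = start ∨ neighbor = goal) then
    st
  else if PySem.Set.contains st.2 neighbor then
    st
  else
    (st.1 ++ [path ++ [neighbor]], PySem.Set.add st.2 neighbor)

-- B's 'while queue:' loop over a queue of complete paths
def fipLoopB (adjacency : List (Int × List Int)) (start goal : Int)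
    (hull_edges : List (Int × Int)) :
    Nat → List (List Int) → PySem.Set Int → Option (List Int)
  | 0, _, _ => none
  | _ + 1, [], _ => none
  | fuel + 1, path :: rest, visited =>
    let node := (PySem.List.pyGet? path (-1)).getD 0
    if node = goal then some path
    else
      let st := ((List.lookup node adjacency).getD []).foldl
        (fipScanB start goal hull_edges node path) (rest, visited)
      fipLoopB adjacency start goal hull_edges fuel st.1 st.2

def find_interior_path_alt (adjacency : List (Int × List Int)) (start : Int) (goal : Int) (hull_edges : List (Int × Int)) : Option (List Int) :=
  let fuel := adjacency.foldl (fun a p => a + p.2.length) 0 + 1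
  fipLoopB adjacency start goal hull_edges fuel [[start]] (PySem.Set.ofList [start])

-- ===== PRECONDITION & SPEC =====
def Spec_find_interior_path (adjacency : List (Int × List Int)) (start : Int) (goal : Int) (hull_edges : List (Int × Int)) (out : Option (List Int)) : Prop := out = find_interior_path_alt adjacency start goal hull_edges
instance (adjacency : List (Int × List Int)) (start : Int) (goal : Int) (hull_edges : List (Int × Int)) (out : Option (List Int)) : Decidable (Spec_find_interior_path adjacency start goal hull_edges out) := by unfold Spec_find_interior_path; infer_instance

-- ===== CLAIM (what is proved, stated in full; the proofs are below) =====
def Claim_equal_find_interior_path : Prop := ∀ (adjacency : List (Int × List Int)) (start : Int) (goal : Int) (hull_edges : List (Int × Int)), Dom_find_interior_path adjacency start goal hull_edges → Spec_find_interior_path adjacency start goal hull_edges (find_interior_path adjacency start goal hull_edges)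

-- ===== LEMMAS AND PROOFS =====

-- last element of a queued path, as B computes it
def lastD (p : List Int) : Int := (PySem.List.pyGet? p (-1)).getD 0

-- the invariant tying a queued path of B to A's parents table
def GoodPath (start : Int) (parents : PySem.Dict Int (Option Int)) (p : List Int) : Prop :=
  p ≠ [] ∧ p.head? = some start ∧ p.Nodup ∧
  parents.get? start = some none ∧
  (∀ x ∈ p, (parents.get? x).isSome) ∧
  List.IsChain (fun a b => parents.get? b = some (some a)) p

theorem lastD_append_singleton (p : List Int) (x : Int) : lastD (p ++ [x]) = x := by
  simp [lastD, PySem.List.pyGet?_neg_one]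

theorem lastD_eq_getLast (p : List Int) (h : p ≠ []) : lastD p = p.getLast h := by
  simp [lastD, PySem.List.pyGet?_neg_one, List.getLast?_eq_getLast_of_ne_nil h]

theorem goodPath_insert_fresh (start : Int) (parents : PySem.Dict Int (Option Int))
    (p : List Int) (k : Int) (v : Option Int)
    (hg : GoodPath start parents p) (hk : parents.get? k = none) :
    GoodPath start (parents.insert k v) p := by
  obtain ⟨h1, h2, h3, h4, h5, h6⟩ := hg
  have hne : ∀ x ∈ p, ¬ (x = k) := by
    intro x hx hxk
    have := h5 x hx
    rw [hxk, hk] at this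
    simp at this
  refine ⟨h1, h2, h3, ?_, ?_, ?_⟩
  · rw [PySem.Dict.get?_insert, if_neg ?_]
    · exact h4
    · intro hsk
      rw [hsk, hk] at h4; simp at h4
  · intro x hx
    rw [PySem.Dict.get?_insert, if_neg (hne x hx)]
    exact h5 x hx
  · refine List.IsChain.imp_of_mem_tail_imp ?_ h6
    intro a b _ hb hab
    rw [PySem.Dict.get?_insert, if_neg (hne b (List.mem_of_mem_tail hb))]
    exact hab

theorem goodPath_extend (start : Int) (parents : PySem.Dict Int (Option Int))
    (p : List Int) (nb : Int)
    (hg : GoodPath start parents p) (hnb : parents.get? nb = none) :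
    GoodPath start (parents.insert nb (some (lastD p))) (p ++ [nb]) := by
  obtain ⟨h1, h2, h3, h4, h5, h6⟩ := goodPath_insert_fresh start parents p nb
    (some (lastD p)) hg hnb
  have hnbp : nb ∉ p := by
    intro hmem
    have := hg.2.2.2.2.1 nb hmem
    rw [hnb] at this; simp at this
  refine ⟨by simp, ?_, ?_, h4, ?_, ?_⟩
  · obtain ⟨a, t, rfl⟩ := List.exists_cons_of_ne_nil h1
    simpa using h2
  · rw [List.nodup_append]
    refine ⟨h3, List.nodup_singleton _, ?_⟩
    intro a ha b hb
    have hbnb : b = nb := by simpa using hb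
    subst hbnb
    exact fun hab => hnbp (hab ▸ ha)
  · intro x hx
    rcases List.mem_append.1 hx with hx | hx
    · exact h5 x hx
    · simp only [List.mem_singleton] at hx
      subst hx
      rw [PySem.Dict.get?_insert, if_pos rfl]
      simp
  · refine List.isChain_append.2 ⟨h6, List.isChain_singleton nb, ?_⟩
    intro x hx y hy
    simp only [List.head?_cons, Option.mem_def, Option.some.injEq] at hy
    subst hy
    rw [List.getLast?_eq_getLast_of_ne_nil h1, Option.mem_def, Option.some.injEq] at hx
    rw [PySem.Dict.get?_insert, if_pos rfl, lastD_eq_getLast p h1, hx]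

theorem back_chain (parents : PySem.Dict Int (Option Int)) (start : Int) :
    ∀ (p : List Int) (acc : List Int) (F : Nat) (hne : p ≠ []),
    p.head? = some start → parents.get? start = some none →
    List.IsChain (fun a b => parents.get? b = some (some a)) p →
    p.length ≤ F →
    fipBack parents F (some (p.getLast hne)) acc = acc ++ p.reverse := by
  intro p
  induction p using List.reverseRecOn with
  | nil => intro acc F hne; exact absurd rfl hne
  | append_singleton q b ih =>
    intro acc F hne hhead hstart hchain hlen
    rcases F with _ | F
    · simp at hlen
    by_cases hq0 : q = []
    · subst hq0
      have hb : b = start := by simpa using hhead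
      subst hb
      simp only [List.nil_append, List.getLast_singleton, List.reverse_cons,
        List.reverse_nil]
      rw [fipBack, hstart]
      simp [fipBack]
    · obtain ⟨hchq, _, hlink⟩ := List.isChain_append.1 hchain
      have hcb : parents.get? b = some (some (q.getLast hq0)) := by
        apply hlink
        · rw [List.getLast?_eq_getLast_of_ne_nil hq0]; rfl
        · rfl
      have hlast : (q ++ [b]).getLast hne = b := by simp
      rw [hlast, fipBack, hcb]
      simp only [Option.getD_some]
      have hheadq : q.head? = some start := by
        rw [← hhead]
        exact (List.head?_append_of_ne_nil _ hq0).symm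
      have hlenq : q.length ≤ F := by
        simp only [List.length_append, List.length_cons, List.length_nil] at hlen
        omega
      rw [ih (acc ++ [b]) F hq0 hheadq hstart hchq hlenq]
      simp

theorem length_le_size (parents : PySem.Dict Int (Option Int)) (p : List Int)
    (hnd : p.Nodup) (hmem : ∀ x ∈ p, (parents.get? x).isSome) :
    p.length ≤ parents.size := by
  have hsub : p ⊆ parents.keys := by
    intro x hx
    by_contra hnk
    have := (PySem.Dict.get?_eq_none_iff_not_mem_keys parents x).2 hnk
    have h2 := hmem x hx
    rw [this] at h2; simp at h2
  have := (List.Nodup.subperm hnd hsub).length_le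
  simpa [PySem.Dict.keys, PySem.Dict.size] using this

theorem finish_goodPath (start goal : Int) (parents : PySem.Dict Int (Option Int))
    (p : List Int) (hg : GoodPath start parents p) (hl : lastD p = goal) :
    fipFinish start goal parents = some p := by
  obtain ⟨h1, h2, h3, h4, h5, h6⟩ := hg
  have hgl : p.getLast h1 = goal := by rw [← hl, lastD_eq_getLast p h1]
  have hback : fipBack parents (parents.size + 1) (some goal) [] = [] ++ p.reverse := by
    rw [← hgl]
    exact back_chain parents start p [] (parents.size + 1) h1 h2 h4 h6
      (by have := length_le_size parents p h3 h5; omega)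
  unfold fipFinish
  rw [hback]
  simp only [List.nil_append, List.reverse_reverse]
  rw [if_neg]
  push Not
  refine ⟨h1, h2, ?_⟩
  rw [List.getLast?_eq_getLast_of_ne_nil h1, hgl]

theorem contains_shift (visited : PySem.Set Int) (parents : PySem.Dict Int (Option Int))
    (nb node : Int)
    (hv : ∀ x : Int, PySem.Set.contains visited x = parents.contains x) (x : Int) :
    PySem.Set.contains (PySem.Set.add visited nb) x
      = (parents.insert nb (some node)).contains x := by
  rw [Bool.eq_iff_iff]
  have hvx := hv x
  rw [Bool.eq_iff_iff] at hvx
  rw [PySem.Set.contains_iff, PySem.Set.mem_add,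
    PySem.Dict.contains_iff_mem_keys, PySem.Dict.mem_keys_insert]
  rw [PySem.Set.contains_iff, PySem.Dict.contains_iff_mem_keys] at hvx
  tauto

theorem scan_rel (start goal : Int) (hull_edges : List (Int × Int)) (node : Int)
    (path : List Int) (hpath_last : lastD path = node) :
    ∀ (nbrs : List Int) (qB : List (List Int)) (parents : PySem.Dict Int (Option Int))
      (visited : PySem.Set Int),
    (∀ q ∈ path :: qB, GoodPath start parents q) →
    (∀ x : Int, PySem.Set.contains visited x = parents.contains x) →
    (nbrs.foldl (fipScanA start goal hull_edges node) (qB.map lastD, parents)).1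
      = ((nbrs.foldl (fipScanB start goal hull_edges node path) (qB, visited)).1).map lastD ∧
    (∀ q ∈ path :: (nbrs.foldl (fipScanB start goal hull_edges node path) (qB, visited)).1,
      GoodPath start (nbrs.foldl (fipScanA start goal hull_edges node) (qB.map lastD, parents)).2 q) ∧
    (∀ x : Int, PySem.Set.contains (nbrs.foldl (fipScanB start goal hull_edges node path) (qB, visited)).2 x
      = (nbrs.foldl (fipScanA start goal hull_edges node) (qB.map lastD, parents)).2.contains x) := by
  intro nbrs
  induction nbrs with
  | nil =>
    intro qB parents visited hq hv
    exact ⟨rfl, hq, hv⟩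
  | cons nb rest ih =>
    intro qB parents visited hq hv
    simp only [List.foldl_cons]
    by_cases hguard : normalize_edge node nb ∈ hull_edges ∧ ¬(node = start ∨ node = goal) ∧
        ¬(nb = start ∨ nb = goal)
    · rw [show fipScanA start goal hull_edges node (qB.map lastD, parents) nb
          = (qB.map lastD, parents) from by rw [fipScanA, if_pos hguard],
        show fipScanB start goal hull_edges node path (qB, visited) nb
          = (qB, visited) from by rw [fipScanB, if_pos hguard]]
      exact ih qB parents visited hq hv
    · by_cases hcon : parents.contains nb = true
      · have hconB : PySem.Set.contains visited nb = true := by rw [hv nb]; exact hcon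
        have hmemv : nb ∈ visited := by simpa using hconB
        have hmemk : nb ∈ parents.keys := by
          rw [← PySem.Dict.contains_iff_mem_keys]; exact hcon
        rw [show fipScanA start goal hull_edges node (qB.map lastD, parents) nb
            = (qB.map lastD, parents) from by
              rw [fipScanA, if_neg hguard]; simp [hcon],
          show fipScanB start goal hull_edges node path (qB, visited) nb
            = (qB, visited) from by rw [fipScanB, if_neg hguard]; simp [hmemv]]
        exact ih qB parents visited hq hv
      · have hconB : ¬ (PySem.Set.contains visited nb = true) := by rw [hv nb]; exact hcon
        have hget : parents.get? nb = none := by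
          rw [PySem.Dict.get?_eq_none_iff_not_mem_keys, ← PySem.Dict.contains_iff_mem_keys]
          simpa using hcon
        rw [show fipScanA start goal hull_edges node (qB.map lastD, parents) nb
            = (qB.map lastD ++ [nb], parents.insert nb (some node)) from by
              rw [fipScanA, if_neg hguard]; simp only; rw [if_neg hcon],
          show fipScanB start goal hull_edges node path (qB, visited) nb
            = (qB ++ [path ++ [nb]], PySem.Set.add visited nb) from by
              have hmemv : nb ∉ visited := by simpa using hconB
              rw [fipScanB, if_neg hguard]; simp [hmemv]]
        have hmapeq : qB.map lastD ++ [nb] = (qB ++ [path ++ [nb]]).map lastD := by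
          rw [List.map_append]
          simp [lastD_append_singleton]
        rw [hmapeq]
        apply ih
        · intro q hqmem
          rcases List.mem_cons.1 hqmem with rfl | hqmem
          · exact goodPath_insert_fresh start parents q nb (some node)
              (hq q (List.mem_cons_self)) hget
          · rcases List.mem_append.1 hqmem with hqmem | hqmem
            · exact goodPath_insert_fresh start parents q nb (some node)
                (hq q (List.mem_cons_of_mem _ hqmem)) hget
            · simp only [List.mem_singleton] at hqmem
              subst hqmem
              rw [← hpath_last]
              exact goodPath_extend start parents path nb (hq path List.mem_cons_self) hget
        · exact contains_shift visited parents nb node hv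

theorem loop_rel (adjacency : List (Int × List Int)) (start goal : Int)
    (hull_edges : List (Int × Int)) :
    ∀ (fuel : Nat) (qB : List (List Int)) (parents : PySem.Dict Int (Option Int))
      (visited : PySem.Set Int),
    (∀ q ∈ qB, GoodPath start parents q) →
    (∀ x : Int, PySem.Set.contains visited x = parents.contains x) →
    (match fipLoopA adjacency start goal hull_edges fuel (qB.map lastD) parents with
     | none => none
     | some ps => fipFinish start goal ps)
      = fipLoopB adjacency start goal hull_edges fuel qB visited := by
  intro fuel
  induction fuel with
  | zero => intro qB parents visited _ _; rfl
  | succ fuel ih =>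
    intro qB parents visited hq hv
    rcases qB with _ | ⟨path, rest⟩
    · rfl
    · simp only [List.map_cons]
      rw [fipLoopA, fipLoopB]
      simp only
      by_cases hgoal : lastD path = goal
      · rw [show ((PySem.List.pyGet? path (-1)).getD 0 : Int) = lastD path from rfl, hgoal]
        rw [if_pos rfl, if_pos rfl]
        exact finish_goodPath start goal parents path (hq path List.mem_cons_self) hgoal
      · rw [show ((PySem.List.pyGet? path (-1)).getD 0 : Int) = lastD path from rfl]
        rw [if_neg hgoal, if_neg hgoal]
        obtain ⟨hmap, hgood, hcon⟩ := scan_rel start goal hull_edges (lastD path) path rfl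
          ((List.lookup (lastD path) adjacency).getD []) rest parents visited hq hv
        rw [hmap]
        exact ih _ _ _ (fun q hq' => hgood q (List.mem_cons_of_mem _ hq')) hcon

-- ===== VERDICT (by name: the statement is the Claim_ definition above) =====
theorem find_interior_path_spec : Claim_equal_find_interior_path := by
  intro adjacency start goal hull_edges _
  unfold Spec_find_interior_path find_interior_path find_interior_path_alt
  have hmap : ([start] : List Int) = ([[start]] : List (List Int)).map lastD := by
    simp [lastD, PySem.List.pyGet?_neg_one]
  simp only
  rw [hmap]
  refine loop_rel adjacency start goal hull_edges _ [[start]]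
    (PySem.Dict.empty.insert start none) (PySem.Set.ofList [start]) ?_ ?_
  · intro q hqmem
    simp only [List.mem_singleton] at hqmem
    subst hqmem
    refine ⟨by simp, rfl, by simp, ?_, ?_, List.isChain_singleton start⟩
    · rw [PySem.Dict.get?_insert, if_pos rfl]
    · intro x hx
      simp only [List.mem_singleton] at hx
      subst hx
      rw [PySem.Dict.get?_insert, if_pos rfl]
      rfl
  · intro x
    rw [Bool.eq_iff_iff, PySem.Set.contains_iff, PySem.Set.mem_ofList,
      PySem.Dict.contains_iff_mem_keys, PySem.Dict.mem_keys_insert]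
    simp [PySem.Dict.keys_empty]
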